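-- pv_equiv track=rewrite | github.com/gerrymandr/spanning_trees | importance_sampling_integrator.py | merge_historgrams
-- ===== SOURCE A (Python) =====
-- def merge_historgrams(histogram_1, histogram_2):
--     out = {}
--     for key in histogram_1.keys():
--         out[key] = 0
--     for key in histogram_2.keys():
--         out[key] = 0
--     for key in out.keys():
--         if key in histogram_1.keys():
--             out[key] += histogram_1[key]
--         if key in histogram_2.keys():
--             out[key] += histogram_2[key]
--     return out
-- ===== SOURCE B (Python) =====
-- def merge_historgrams(histogram_1, histogram_2):
--     out = dict(histogram_1)
--     for key, value in histogram_2.items():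
--         out[key] = out.get(key, 0) + value
--     return out
-- ===== Notes on version B (the rewrite author's own statement) =====
-- stated objective: idiomatic
-- what changed: A zero-initializes a union-key dict in two passes and then re-scans it with two membership-guarded additions per key; B copies histogram_1 and makes one merging pass over histogram_2 with out.get(key, 0) + value.
import Mathlib
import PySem

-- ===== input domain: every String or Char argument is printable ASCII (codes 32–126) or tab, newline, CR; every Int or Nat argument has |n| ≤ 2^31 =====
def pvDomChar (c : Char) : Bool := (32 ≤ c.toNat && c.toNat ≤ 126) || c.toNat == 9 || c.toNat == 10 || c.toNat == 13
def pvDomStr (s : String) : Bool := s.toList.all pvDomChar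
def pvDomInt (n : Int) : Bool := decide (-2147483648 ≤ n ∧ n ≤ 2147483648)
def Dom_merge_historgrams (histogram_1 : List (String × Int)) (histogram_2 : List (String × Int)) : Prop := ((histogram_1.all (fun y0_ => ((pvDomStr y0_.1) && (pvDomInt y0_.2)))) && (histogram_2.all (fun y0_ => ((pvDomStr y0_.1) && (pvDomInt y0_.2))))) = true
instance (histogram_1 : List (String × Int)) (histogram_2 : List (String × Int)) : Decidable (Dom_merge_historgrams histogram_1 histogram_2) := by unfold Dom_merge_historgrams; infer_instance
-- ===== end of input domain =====

-- B replaces A's zero-init passes plus guarded re-scan by a copy of histogram_1 and one merging pass over histogram_2 (idiomatic; return value only, no mutation either way).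

-- ===== PORT A =====
def merge_historgrams (histogram_1 : List (String × Int)) (histogram_2 : List (String × Int)) : List (String × Int) :=
  let d1 : PySem.Dict String Int := PySem.Dict.mk histogram_1
  let d2 : PySem.Dict String Int := PySem.Dict.mk histogram_2
  let out0 := d1.keys.foldl (fun o k => o.insert k 0) PySem.Dict.empty
  let out1 := d2.keys.foldl (fun o k => o.insert k 0) out0
  let out2 := out1.keys.foldl (fun o k =>
    let o := if d1.contains k then o.insert k (o.getD k 0 + d1.getD k 0) else o
    if d2.contains k then o.insert k (o.getD k 0 + d2.getD k 0) else o) out1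
  out2.items

-- ===== PORT B =====
def merge_historgrams_alt (histogram_1 : List (String × Int)) (histogram_2 : List (String × Int)) : List (String × Int) :=
  (histogram_2.foldl
    (fun (o : PySem.Dict String Int) p => o.insert p.1 (o.getD p.1 0 + p.2))
    (PySem.Dict.mk histogram_1)).items

-- ===== PRECONDITION & SPEC =====
-- Pre_ excludes association lists with duplicate keys: they do not represent Python dicts, which are A's actual arguments (a dict has unique keys).
def Pre_merge_historgrams (histogram_1 : List (String × Int)) (histogram_2 : List (String × Int)) : Prop :=
  (histogram_1.map Prod.fst).Nodup ∧ (histogram_2.map Prod.fst).Nodup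
instance (histogram_1 : List (String × Int)) (histogram_2 : List (String × Int)) : Decidable (Pre_merge_historgrams histogram_1 histogram_2) := by unfold Pre_merge_historgrams; infer_instance
def pvWitness_merge_historgrams : (List (String × Int)) × (List (String × Int)) :=
  ([("a", 1), ("b", -2)], [("b", 3), ("c", 4)])

def Spec_merge_historgrams (histogram_1 : List (String × Int)) (histogram_2 : List (String × Int)) (out : List (String × Int)) : Prop := out = merge_historgrams_alt histogram_1 histogram_2
instance (histogram_1 : List (String × Int)) (histogram_2 : List (String × Int)) (out : List (String × Int)) : Decidable (Spec_merge_historgrams histogram_1 histogram_2 out) := by unfold Spec_merge_historgrams; infer_instance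

-- ===== CLAIM (what is proved, stated in full; the proofs are below) =====
def Claim_equal_merge_historgrams : Prop := ∀ (histogram_1 : List (String × Int)) (histogram_2 : List (String × Int)), Dom_merge_historgrams histogram_1 histogram_2 → Pre_merge_historgrams histogram_1 histogram_2 → Spec_merge_historgrams histogram_1 histogram_2 (merge_historgrams histogram_1 histogram_2)

-- ===== LEMMAS AND PROOFS =====

-- the body of A's third loop, named for the proofs (definitionally the fold function in the port)
def pvStep (d1 d2 : PySem.Dict String Int) (o : PySem.Dict String Int) (k : String) : PySem.Dict String Int :=
  let o' := if d1.contains k then o.insert k (o.getD k 0 + d1.getD k 0) else o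
  if d2.contains k then o'.insert k (o'.getD k 0 + d2.getD k 0) else o'

-- zero-init loop: value is 0 on the visited keys, untouched elsewhere
theorem pv_zero_getD (l : List String) (d : PySem.Dict String Int) (k : String) :
    (l.foldl (fun o k => o.insert k 0) d).getD k 0 = if k ∈ l then 0 else d.getD k 0 := by
  induction l generalizing d with
  | nil => simp
  | cons h t ih =>
      simp only [List.foldl_cons, ih, List.mem_cons]
      by_cases hk : k ∈ t
      · simp [hk]
      · by_cases hkh : k = h <;> simp [hk, hkh, PySem.Dict.getD_insert]

-- literal-dict lookups, cons step
theorem pv_getD_mk_cons (p : String × Int) (t : List (String × Int)) (k : String) :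
    (PySem.Dict.mk (p :: t)).getD k 0 = if p.1 = k then p.2 else (PySem.Dict.mk t).getD k 0 := by
  rw [PySem.Dict.getD_eq_get?_getD, PySem.Dict.get?_mk_cons]
  by_cases h : p.1 = k <;> simp [h, PySem.Dict.getD_eq_get?_getD]

theorem pv_contains_mk_cons (p : String × Int) (t : List (String × Int)) (k : String) :
    (PySem.Dict.mk (p :: t)).contains k = (p.1 = k || (PySem.Dict.mk t).contains k) := by
  rw [PySem.Dict.contains_eq_isSome_get?, PySem.Dict.get?_mk_cons,
      PySem.Dict.contains_eq_isSome_get?]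
  by_cases h : p.1 = k <;> simp [h]

-- B's merging loop: getD adds histogram_2's value at the key (0 if absent)
theorem pv_alt_getD (l : List (String × Int)) (d : PySem.Dict String Int) (k : String)
    (hnd : (l.map Prod.fst).Nodup) :
    (l.foldl (fun o p => o.insert p.1 (o.getD p.1 0 + p.2)) d).getD k 0 =
      d.getD k 0 + (if (PySem.Dict.mk l).contains k then (PySem.Dict.mk l).getD k 0 else 0) := by
  induction l generalizing d with
  | nil => simp [PySem.Dict.contains, PySem.Dict.get?, PySem.Dict.getD]
  | cons p t ih =>
      simp only [List.map_cons, List.nodup_cons] at hnd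
      simp only [List.foldl_cons, ih _ hnd.2, pv_getD_mk_cons, pv_contains_mk_cons]
      by_cases hk : p.1 = k
      · subst hk
        have hct : (PySem.Dict.mk t).contains p.1 = false := by
          have hmem : p.1 ∉ (PySem.Dict.mk t).keys := by
            simpa [PySem.Dict.keys] using hnd.1
          rw [PySem.Dict.contains_eq_decide_mem_keys]
          simpa using hmem
        simp [hct]
      · have hb : (p.1 == k) = false := by simp [hk]
        have hne : ¬(k = p.1) := fun e => hk e.symm
        simp only [PySem.Dict.getD_insert, if_neg hne]
        rw [decide_eq_false hk, Bool.false_or, if_neg hk]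

-- one step of A's third loop keeps the key list when the visited key is present
theorem pv_step_keys (d1 d2 o : PySem.Dict String Int) (k : String) (hc : o.contains k = true) :
    (pvStep d1 d2 o k).keys = o.keys := by
  unfold pvStep
  split_ifs <;>
    simp [PySem.Dict.keys_insert_of_contains, hc, PySem.Dict.contains_insert_self]

-- A's third loop: keys are preserved along the fold (visited keys all present)
theorem pv_loop_keys (d1 d2 : PySem.Dict String Int) (l : List String) (o : PySem.Dict String Int)
    (hl : ∀ k ∈ l, k ∈ o.keys) :
    (l.foldl (pvStep d1 d2) o).keys = o.keys := by
  induction l generalizing o with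
  | nil => rfl
  | cons h t ih =>
      have hc : o.contains h = true := by
        rw [PySem.Dict.contains_eq_decide_mem_keys]; simpa using hl h (by simp)
      have hk' : ∀ k ∈ t, k ∈ (pvStep d1 d2 o h).keys := by
        intro k hk; rw [pv_step_keys d1 d2 o h hc]; exact hl k (by simp [hk])
      simp only [List.foldl_cons]
      rw [ih _ hk', pv_step_keys d1 d2 o h hc]

-- step effect on getD
theorem pv_step_getD (d1 d2 o : PySem.Dict String Int) (h k : String) :
    (pvStep d1 d2 o h).getD k 0 =
      if k = h then
        o.getD h 0 + (if d1.contains h then d1.getD h 0 else 0)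
                   + (if d2.contains h then d2.getD h 0 else 0)
      else o.getD k 0 := by
  unfold pvStep
  by_cases hk : k = h
  · subst hk
    simp only [if_pos rfl]
    split_ifs with hc1 hc2 hc2 <;> simp [PySem.Dict.getD_insert]
  · simp only [if_neg hk]
    split_ifs with hc1 hc2 hc2 <;> simp [PySem.Dict.getD_insert, hk]

-- A's third loop over a duplicate-free key list: final getD
theorem pv_loop_getD (d1 d2 : PySem.Dict String Int) (l : List String) (o : PySem.Dict String Int)
    (k : String) (hnd : l.Nodup) :
    (l.foldl (pvStep d1 d2) o).getD k 0 =
      if k ∈ l then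
        o.getD k 0 + (if d1.contains k then d1.getD k 0 else 0)
                   + (if d2.contains k then d2.getD k 0 else 0)
      else o.getD k 0 := by
  induction l generalizing o with
  | nil => simp
  | cons h t ih =>
      simp only [List.nodup_cons] at hnd
      simp only [List.foldl_cons, ih _ hnd.2, List.mem_cons, pv_step_getD]
      by_cases hk : k ∈ t
      · have hne : k ≠ h := fun e => hnd.1 (e ▸ hk)
        simp [hk, hne]
      · by_cases hkh : k = h
        · subst hkh; simp [hk]
        · simp [hk, hkh]

-- a duplicate-free list is already a set
theorem pv_ofList_nodup {l : List String} (h : l.Nodup) : PySem.Set.ofList l = l := by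
  have h2 := PySem.Set.update_eq_append_of_disjoint ([] : List String) l h (by simp)
  simpa [PySem.Set.update_nil_left] using h2

-- membership in a set update
theorem pv_mem_update (s : List String) (xs : List String) (k : String) :
    k ∈ PySem.Set.update s xs ↔ k ∈ s ∨ k ∈ xs := by
  rw [PySem.Set.update_eq_append_filter]
  simp [PySem.Set.contains, PySem.Set.mem_ofList]
  tauto

-- ===== VERDICT (by name: the statement is the Claim_ definition above) =====
theorem merge_historgrams_spec : Claim_equal_merge_historgrams := by
  intro h1 h2 _ hpre
  obtain ⟨hn1, hn2⟩ := hpre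
  unfold Spec_merge_historgrams merge_historgrams merge_historgrams_alt
  simp only []
  set d1 : PySem.Dict String Int := PySem.Dict.mk h1 with hd1
  set d2 : PySem.Dict String Int := PySem.Dict.mk h2 with hd2
  have hk1 : d1.keys = h1.map Prod.fst := by simp [hd1, PySem.Dict.keys]
  have hk2 : d2.keys = h2.map Prod.fst := by simp [hd2, PySem.Dict.keys]
  set out0 := d1.keys.foldl (fun (o : PySem.Dict String Int) (k : String) => o.insert k (0 : Int)) PySem.Dict.empty with hout0
  set out1 := d2.keys.foldl (fun (o : PySem.Dict String Int) (k : String) => o.insert k (0 : Int)) out0 with hout1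
  -- the fold function of A's third loop is pvStep
  have hstep : (fun (o : PySem.Dict String Int) (k : String) =>
      let o := if d1.contains k then o.insert k (o.getD k 0 + d1.getD k 0) else o
      if d2.contains k then o.insert k (o.getD k 0 + d2.getD k 0) else o) = pvStep d1 d2 := rfl
  rw [hstep]
  set DA := out1.keys.foldl (pvStep d1 d2) out1 with hDA
  set DB := h2.foldl (fun (o : PySem.Dict String Int) p => o.insert p.1 (o.getD p.1 0 + p.2)) d1 with hDB
  -- keys of the zero-initialized dict
  have hkeys0 : out0.keys = h1.map Prod.fst := by
    rw [hout0, PySem.Dict.keys_foldl_insert]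
    simp only [PySem.Dict.keys_empty, PySem.Set.update_nil_left, hk1]
    exact pv_ofList_nodup hn1
  have hkeys1 : out1.keys = PySem.Set.update (h1.map Prod.fst) (h2.map Prod.fst) := by
    rw [hout1, PySem.Dict.keys_foldl_insert, hkeys0, hk2]
  have hnd0 : out0.keys.Nodup := by
    rw [hout0]; exact PySem.Dict.nodup_keys_foldl_insert _ _ _ PySem.Dict.nodup_keys_empty
  have hnd1 : out1.keys.Nodup := by
    rw [hout1]; exact PySem.Dict.nodup_keys_foldl_insert _ _ _ hnd0
  -- keys of both results
  have hkeysA : DA.keys = out1.keys := pv_loop_keys d1 d2 out1.keys out1 (fun k hk => hk)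
  have hkeysB : DB.keys = PySem.Set.update (h1.map Prod.fst) (h2.map Prod.fst) := by
    rw [hDB, PySem.Dict.keys_foldl_insert_key]
    rw [hk1]
  have hkeysAB : DA.keys = DB.keys := by rw [hkeysA, hkeys1, hkeysB]
  have hndA : DA.keys.Nodup := by rw [hkeysA]; exact hnd1
  have hndB : DB.keys.Nodup := by
    rw [hDB]
    refine PySem.Dict.nodup_keys_foldl_insert_key _ _ _ _ ?_
    rw [hk1]; exact hn1
  -- values agree on the (common) keys
  have hval : ∀ k ∈ out1.keys, DA.getD k 0 = DB.getD k 0 := by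
    intro k hk
    have hz1 : out1.getD k 0 = 0 := by
      have hmem : k ∈ h1.map Prod.fst ∨ k ∈ h2.map Prod.fst := by
        rw [hkeys1, pv_mem_update] at hk; exact hk
      rw [hout1, pv_zero_getD, hout0, pv_zero_getD]
      rw [hk1, hk2]
      rcases hmem with hm | hm <;> simp [hm]
    have hA : DA.getD k 0 =
        (if d1.contains k then d1.getD k 0 else 0) + (if d2.contains k then d2.getD k 0 else 0) := by
      rw [hDA, pv_loop_getD d1 d2 out1.keys out1 k hnd1, if_pos hk, hz1, zero_add]
    have hB : DB.getD k 0 = d1.getD k 0 + (if d2.contains k then d2.getD k 0 else 0) := by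
      rw [hDB, pv_alt_getD h2 d1 k hn2, hd2]
    have hd1g : (if d1.contains k then d1.getD k 0 else 0) = d1.getD k 0 := by
      by_cases hc : d1.contains k = true
      · rw [if_pos hc]
      · have hcf : d1.contains k = false := by simpa using hc
        simp [hcf, PySem.Dict.getD_of_not_contains]
    rw [hA, hB, hd1g]
  -- items are equal
  have hitems : DA.items = DB.items := by
    rw [PySem.Dict.items_eq_map_keys DA hndA 0, PySem.Dict.items_eq_map_keys DB hndB 0, ← hkeysAB]
    refine List.map_congr_left ?_
    intro k hk
    rw [hval k (by rwa [hkeysA] at hk)]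
  exact hitems
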